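-- pv_equiv track=rewrite | github.com/krishna-v2/BlueShield_DocPro | BlueShieldDocPro/get_email.py | find_top_2_symbols_by_len
-- ===== SOURCE A (Python) =====
-- import collections
--
-- def find_top_2_symbols_by_len(symbols):
--     lens = [len(i) for i in symbols]
--     c = collections.Counter(lens)
--     if len(c) == 1:
--         return symbols, [], []
--
--     l1 = c.most_common(1)[0][0]
--     l2 = c.most_common(2)[1][0]
--
--     leftovers = []
--     frequent1 = []
--     frequent2 = []
--     for s in symbols:
--         if len(s) == l1:
--             frequent1.append(s)
--         elif len(s) == l2:
--             frequent2.append(s)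
--         else:
--             leftovers.append(s)
--
--     return frequent1, frequent2, leftovers
-- ===== SOURCE B (Python) =====
-- def find_top_2_symbols_by_len(symbols):
--     # Group symbols by length in one pass, then pick the two largest groups
--     # with a single running max/second-max scan (no Counter, no sorting).
--     groups = {}
--     for s in symbols:
--         groups.setdefault(len(s), []).append(s)
--     if len(groups) == 1:
--         return symbols, [], []
--     c1 = c2 = -1
--     l1 = l2 = None
--     for k, g in groups.items():
--         n = len(g)
--         if n > c1:
--             l2, c2 = l1, c1
--             l1, c1 = k, n
--         elif n > c2:
--             l2, c2 = k, n
--     leftovers = [s for s in symbols if len(s) != l1 and len(s) != l2]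
--     return groups[l1], groups[l2], leftovers
-- ===== Notes on version B (the rewrite author's own statement) =====
-- stated objective: alternative
-- what changed: B drops Counter and most_common entirely: it groups symbols by length into a dict in one pass and then selects the two largest groups with a single running max/second-max scan over the groups (O(k) selection instead of sorting the counts), keeping A's tie-breaking because the scan visits lengths in first-occurrence order and replaces only on strictly larger counts; leftovers come from a separate comprehension.
import Mathlib
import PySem

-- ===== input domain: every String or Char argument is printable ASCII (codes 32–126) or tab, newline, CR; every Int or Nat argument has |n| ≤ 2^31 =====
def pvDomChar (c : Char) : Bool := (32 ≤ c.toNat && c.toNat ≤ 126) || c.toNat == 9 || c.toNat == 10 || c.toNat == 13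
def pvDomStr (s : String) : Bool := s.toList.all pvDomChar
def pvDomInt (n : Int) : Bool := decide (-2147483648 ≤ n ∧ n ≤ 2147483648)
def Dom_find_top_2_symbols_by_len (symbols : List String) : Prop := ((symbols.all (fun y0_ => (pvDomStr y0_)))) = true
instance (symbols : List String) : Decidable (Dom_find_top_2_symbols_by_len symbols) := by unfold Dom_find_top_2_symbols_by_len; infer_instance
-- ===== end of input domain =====

-- B groups symbols by length in one pass and picks the two largest groups by a
-- single running max/second-max scan (no Counter, no sorting); same cost class
-- overall (objective: alternative algorithm for the top-2 selection).

-- ===== PORT A =====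
def find_top_2_symbols_by_len (symbols : List String) : List String × List String × List String :=
  let lens : List Int := symbols.map (fun i => PySem.Str.len i)
  let c : PySem.Dict Int Int := PySem.Dict.counter lens
  if c.size = 1 then (symbols, [], [])
  else
    -- most_common(n) = sorted(c.items(), key=count, reverse=True)[:n]; the [0]/[1]
    -- indexings raise IndexError on an empty counter (excluded by Pre_), hence pyGet?/getD
    let l1 : Int := ((PySem.List.pyGet? (PySem.List.sorted c.items (fun p => p.2) true) 0).map Prod.fst).getD 0
    let l2 : Int := ((PySem.List.pyGet? (PySem.List.sorted c.items (fun p => p.2) true) 1).map Prod.fst).getD 0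
    symbols.foldl
      (fun acc s =>
        if PySem.Str.len s = l1 then (acc.1 ++ [s], acc.2.1, acc.2.2)
        else if PySem.Str.len s = l2 then (acc.1, acc.2.1 ++ [s], acc.2.2)
        else (acc.1, acc.2.1, acc.2.2 ++ [s]))
      ([], [], [])

-- ===== PORT B =====
def find_top_2_symbols_by_len_alt (symbols : List String) : List String × List String × List String :=
  let groups : PySem.Dict Int (List String) :=
    symbols.foldl (fun d s => d.modify (PySem.Str.len s) [] (fun x => x ++ [s])) PySem.Dict.empty
  if groups.size = 1 then (symbols, [], [])
  else
    -- running (count, key) for best and second best; keys are Option Int (Python's None)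
    let st := groups.items.foldl
      (fun st kv =>
        let n : Int := kv.2.length
        if n > st.1.1 then ((n, some kv.1), st.1)
        else if n > st.2.1 then (st.1, (n, some kv.1))
        else st)
      (((-1 : Int), (none : Option Int)), ((-1 : Int), (none : Option Int)))
    -- with ≥ 2 groups both keys are set; getD 0 is the unreachable-None default
    let l1 : Int := st.1.2.getD 0
    let l2 : Int := st.2.2.getD 0
    (groups.getD l1 [], groups.getD l2 [],
     symbols.filter (fun s => decide (¬ PySem.Str.len s = l1 ∧ ¬ PySem.Str.len s = l2)))

-- ===== PRECONDITION & SPEC =====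
-- Pre_ excludes only the empty list, on which A raises IndexError (most_common(1)[0]).
def Pre_find_top_2_symbols_by_len (symbols : List String) : Prop := symbols ≠ []
instance (symbols : List String) : Decidable (Pre_find_top_2_symbols_by_len symbols) := by unfold Pre_find_top_2_symbols_by_len; infer_instance
def pvWitness_find_top_2_symbols_by_len : List String := ["a", "bb", "cc"]

def Spec_find_top_2_symbols_by_len (symbols : List String) (out : List String × List String × List String) : Prop := out = find_top_2_symbols_by_len_alt symbols
instance (symbols : List String) (out : List String × List String × List String) : Decidable (Spec_find_top_2_symbols_by_len symbols out) := by unfold Spec_find_top_2_symbols_by_len; infer_instance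

-- ===== CLAIM (what is proved, stated in full; the proofs are below) =====
def Claim_equal_find_top_2_symbols_by_len : Prop := ∀ (symbols : List String), Dom_find_top_2_symbols_by_len symbols → Pre_find_top_2_symbols_by_len symbols → Spec_find_top_2_symbols_by_len symbols (find_top_2_symbols_by_len symbols)

-- ===== LEMMAS AND PROOFS =====

-- A's fused three-branch partition loop is the three corresponding filters.
lemma triple_fold (key : String → Int) (l1 l2 : Int) (l : List String) (a b c : List String) :
    l.foldl
      (fun acc s =>
        if key s = l1 then (acc.1 ++ [s], acc.2.1, acc.2.2)
        else if key s = l2 then (acc.1, acc.2.1 ++ [s], acc.2.2)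
        else (acc.1, acc.2.1, acc.2.2 ++ [s]))
      (a, b, c) =
    (a ++ l.filter (fun s => decide (key s = l1)),
     b ++ l.filter (fun s => decide (¬ key s = l1 ∧ key s = l2)),
     c ++ l.filter (fun s => decide (¬ key s = l1 ∧ ¬ key s = l2))) := by
  induction l generalizing a b c with
  | nil => simp
  | cons x t ih =>
    by_cases h1 : key x = l1
    · simp [List.foldl_cons, h1, ih]
    · by_cases h2 : key x = l2
      · have hne : ¬ l2 = l1 := h2 ▸ h1
        simp [List.foldl_cons, h2, hne, ih]
      · simp [List.foldl_cons, h1, h2, ih]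

-- insertBy along an injected list
lemma insertBy_map {α β : Type} (f : α → β) (p : β → β → Bool) (q : α → α → Bool)
    (h : ∀ a b, p (f a) (f b) = q a b) (x : α) (ys : List α) :
    PySem.List.insertBy p (f x) (ys.map f) = (PySem.List.insertBy q x ys).map f := by
  induction ys with
  | nil => simp [PySem.List.insertBy]
  | cons y t ih =>
    simp only [List.map_cons, PySem.List.insertBy, h]
    by_cases hq : q x y = true
    · simp [hq]
    · simp [hq, ih]

-- sorted (reverse=True) commutes with mapping the elements through f
lemma sorted_rev_map {α β κ : Type} [LT κ] [DecidableLT κ] (f : α → β) (key : β → κ) (xs : List α) :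
    PySem.List.sorted (xs.map f) key true = (PySem.List.sorted xs (fun x => key (f x)) true).map f := by
  rw [PySem.List.sorted_rev_eq_foldl_insertBy, PySem.List.sorted_rev_eq_foldl_insertBy, List.foldl_map]
  suffices h : ∀ (init : List α),
      xs.foldl (fun acc x => PySem.List.insertBy (fun a b => decide (key b < key a)) (f x) acc) (init.map f)
        = (xs.foldl (fun acc x => PySem.List.insertBy (fun a b => decide (key (f b) < key (f a))) x acc) init).map f by
    simpa using h []
  induction xs with
  | nil => intro init; simp
  | cons x t ih =>
    intro init
    simp only [List.foldl_cons]
    rw [insertBy_map (f := f) (q := fun a b => decide (key (f b) < key (f a))) (h := fun a b => rfl), ih]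

-- B's running max/second-max scan returns the first two entries of the
-- stable descending sort (counts tie-break by first occurrence, as in Python).
lemma top2_fold {α : Type} (f : α → Int) (tag : α → Int) (ps : List α)
    (hpos : ∀ a ∈ ps, 0 ≤ f a) :
    ps.foldl
      (fun st kv =>
        let n : Int := f kv
        if n > st.1.1 then ((n, some (tag kv)), st.1)
        else if n > st.2.1 then (st.1, (n, some (tag kv)))
        else st)
      (((-1 : Int), (none : Option Int)), ((-1 : Int), (none : Option Int))) =
    (match PySem.List.sorted ps f true with
     | [] => (((-1 : Int), (none : Option Int)), ((-1 : Int), (none : Option Int)))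
     | [p] => ((f p, some (tag p)), ((-1 : Int), (none : Option Int)))
     | p :: q :: _ => ((f p, some (tag p)), (f q, some (tag q)))) := by
  rw [PySem.List.sorted_rev_eq_foldl_insertBy]
  induction ps using List.reverseRecOn with
  | nil => simp
  | append_singleton l x ih =>
    have hx : 0 ≤ f x := hpos x (by simp)
    have hl : ∀ a ∈ l, 0 ≤ f a := fun a ha => hpos a (by simp [ha])
    rw [List.foldl_append, List.foldl_append, ih hl]
    cases hS : l.foldl (fun acc y => PySem.List.insertBy (fun a b => decide (f b < f a)) y acc) [] with
    | nil =>
      simp [PySem.List.insertBy]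
      omega
    | cons p t =>
      cases t with
      | nil =>
        simp only [List.foldl_cons, List.foldl_nil, PySem.List.insertBy]
        by_cases h1 : f p < f x
        · simp [h1]
        · have h2 : ¬ f x > f p := by omega
          simp [h1]
          omega
      | cons q r =>
        simp only [List.foldl_cons, List.foldl_nil, PySem.List.insertBy]
        by_cases h1 : f p < f x
        · simp [h1]
        · have h1' : ¬ f x > f p := by omega
          by_cases h2 : f q < f x
          · simp [h1, h2]
          · have h2' : ¬ f x > f q := by omega
            simp [h1, h2]

-- B's grouping dict looks up to the per-length filter of symbols
lemma groups_getD (symbols : List String) (k : Int) :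
    (symbols.foldl (fun d s => d.modify (PySem.Str.len s) [] (fun x => x ++ [s])) PySem.Dict.empty).getD k []
      = symbols.filter (fun s => PySem.Str.len s == k) := by
  have h := PySem.Dict.getD_foldl_modify_append (symbols.map (fun s => (PySem.Str.len s, s)))
    (PySem.Dict.empty (κ := Int) (ν := List String)) k
  rw [List.foldl_map] at h
  simpa [PySem.Dict.getD_empty, List.filter_map, List.map_map, Function.comp_def] using h

-- counting a length among the mapped lengths is the length of the per-length filter
lemma count_len (symbols : List String) (k : Int) :
    (symbols.map (fun i => PySem.Str.len i)).count k
      = (symbols.filter (fun s => PySem.Str.len s == k)).length := by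
  rw [List.count_eq_countP, List.countP_map, List.countP_eq_length_filter]
  simp [Function.comp_def]

-- ===== VERDICT (by name: the statement is the Claim_ definition above) =====
theorem find_top_2_symbols_by_len_spec : Claim_equal_find_top_2_symbols_by_len := by
  intro symbols _ hne
  unfold Spec_find_top_2_symbols_by_len
  simp only [find_top_2_symbols_by_len, find_top_2_symbols_by_len_alt]
  have hG_getD : ∀ k : Int,
      (symbols.foldl (fun d s => d.modify (PySem.Str.len s) [] (fun x => x ++ [s])) PySem.Dict.empty).getD k []
        = symbols.filter (fun s => PySem.Str.len s == k) := groups_getD symbols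
  have hGkeys :
      (symbols.foldl (fun d s => d.modify (PySem.Str.len s) [] (fun x => x ++ [s])) PySem.Dict.empty).keys
        = PySem.Set.ofList (symbols.map (fun i => PySem.Str.len i)) := by
    rw [PySem.Dict.keys_foldl_modify_key symbols (fun s => PySem.Str.len s) []
      (fun _ s => (fun x => x ++ [s])) PySem.Dict.empty]
    simp [PySem.Set.update, PySem.Set.ofList_eq_foldl, PySem.Dict.keys_empty]
  have hGnodup :
      (symbols.foldl (fun d s => d.modify (PySem.Str.len s) [] (fun x => x ++ [s])) PySem.Dict.empty).keys.Nodup := by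
    refine PySem.Dict.nodup_keys_foldl_modify_key symbols (fun s => PySem.Str.len s) []
      (fun _ s => (fun x => x ++ [s])) PySem.Dict.empty ?_
    simp [PySem.Dict.keys_empty]
  have hGitems :
      (symbols.foldl (fun d s => d.modify (PySem.Str.len s) [] (fun x => x ++ [s])) PySem.Dict.empty).items
        = (PySem.Set.ofList (symbols.map (fun i => PySem.Str.len i))).map
            (fun k => (k, symbols.filter (fun s => PySem.Str.len s == k))) := by
    rw [PySem.Dict.items_eq_map_keys _ hGnodup [], hGkeys]
    exact List.map_congr_left (fun k _ => by rw [hG_getD])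
  have hCitems :
      (PySem.Dict.counter (symbols.map (fun i => PySem.Str.len i))).items
        = (PySem.Set.ofList (symbols.map (fun i => PySem.Str.len i))).map
            (fun k => (k, ((symbols.map (fun i => PySem.Str.len i)).count k : Int))) :=
    PySem.Dict.items_counter _
  have hsizeC :
      (PySem.Dict.counter (symbols.map (fun i => PySem.Str.len i))).size
        = (PySem.Set.ofList (symbols.map (fun i => PySem.Str.len i))).length := by
    show (PySem.Dict.counter (symbols.map (fun i => PySem.Str.len i))).items.length = _
    rw [hCitems, List.length_map]
  have hsizeG :
      (symbols.foldl (fun d s => d.modify (PySem.Str.len s) [] (fun x => x ++ [s])) PySem.Dict.empty).size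
        = (PySem.Set.ofList (symbols.map (fun i => PySem.Str.len i))).length := by
    show (symbols.foldl (fun d s => d.modify (PySem.Str.len s) [] (fun x => x ++ [s])) PySem.Dict.empty).items.length = _
    rw [hGitems, List.length_map]
  by_cases h1 : (PySem.Set.ofList (symbols.map (fun i => PySem.Str.len i))).length = 1
  · rw [if_pos (by rw [hsizeC]; exact h1), if_pos (by rw [hsizeG]; exact h1)]
  · rw [if_neg (by rw [hsizeC]; exact h1), if_neg (by rw [hsizeG]; exact h1)]
    -- the distinct lengths are at least two
    have hlne : symbols.map (fun i => PySem.Str.len i) ≠ [] := by simpa using hne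
    obtain ⟨x, hx⟩ := List.exists_mem_of_ne_nil _ hlne
    have hxS : x ∈ PySem.Set.ofList (symbols.map (fun i => PySem.Str.len i)) :=
      (PySem.Set.mem_ofList _ _).mpr hx
    have hlen2 : 2 ≤ (PySem.Set.ofList (symbols.map (fun i => PySem.Str.len i))).length := by
      have := List.length_pos_of_mem hxS
      omega
    -- decompose the sorted distinct lengths
    have hSSlen : (PySem.List.sorted (PySem.Set.ofList (symbols.map (fun i => PySem.Str.len i)))
        (fun k : Int => ((symbols.filter (fun s => PySem.Str.len s == k)).length : Int)) true).length
        = (PySem.Set.ofList (symbols.map (fun i => PySem.Str.len i))).length :=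
      PySem.List.length_sorted _ _ _
    obtain ⟨k1, k2, rest, hSSeq⟩ : ∃ k1 k2 rest,
        PySem.List.sorted (PySem.Set.ofList (symbols.map (fun i => PySem.Str.len i)))
          (fun k : Int => ((symbols.filter (fun s => PySem.Str.len s == k)).length : Int)) true
          = k1 :: k2 :: rest := by
      cases hc : PySem.List.sorted (PySem.Set.ofList (symbols.map (fun i => PySem.Str.len i)))
          (fun k : Int => ((symbols.filter (fun s => PySem.Str.len s == k)).length : Int)) true with
      | nil => rw [hc] at hSSlen; simp only [List.length_nil] at hSSlen; omega
      | cons a tl =>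
        cases tl with
        | nil => rw [hc] at hSSlen; simp only [List.length_cons, List.length_nil] at hSSlen; omega
        | cons b tl2 => exact ⟨a, b, tl2, rfl⟩
    have hSSnodup : (PySem.List.sorted (PySem.Set.ofList (symbols.map (fun i => PySem.Str.len i)))
        (fun k : Int => ((symbols.filter (fun s => PySem.Str.len s == k)).length : Int)) true).Nodup :=
      (PySem.List.sorted_perm _ _ _).nodup_iff.mpr (PySem.Set.nodup_ofList _)
    have hk12 : k1 ≠ k2 := by
      rw [hSSeq] at hSSnodup
      simp [List.nodup_cons] at hSSnodup
      tauto
    -- A's two sort-indexings pick k1 and k2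
    have hAsort : PySem.List.sorted (PySem.Dict.counter (symbols.map (fun i => PySem.Str.len i))).items
        (fun p => p.2) true
        = (k1 :: k2 :: rest).map
            (fun k => (k, ((symbols.map (fun i => PySem.Str.len i)).count k : Int))) := by
      rw [hCitems, sorted_rev_map, ← hSSeq]
      congr 1
      congr 1
      funext k
      dsimp only
      rw [count_len]
    -- B's running-max scan over the grouped items picks (k1, k2) too
    have hBsort : PySem.List.sorted
        (symbols.foldl (fun d s => d.modify (PySem.Str.len s) [] (fun x => x ++ [s])) PySem.Dict.empty).items
        (fun kv => (kv.2.length : Int)) true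
        = (k1 :: k2 :: rest).map
            (fun k => (k, symbols.filter (fun s => PySem.Str.len s == k))) := by
      rw [hGitems, sorted_rev_map, ← hSSeq]
    have hst :
        (symbols.foldl (fun d s => d.modify (PySem.Str.len s) [] (fun x => x ++ [s])) PySem.Dict.empty).items.foldl
          (fun st kv =>
            let n : Int := kv.2.length
            if n > st.1.1 then ((n, some kv.1), st.1)
            else if n > st.2.1 then (st.1, (n, some kv.1))
            else st)
          (((-1 : Int), (none : Option Int)), ((-1 : Int), (none : Option Int)))
        = ((((symbols.filter (fun s => PySem.Str.len s == k1)).length : Int), some k1),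
           (((symbols.filter (fun s => PySem.Str.len s == k2)).length : Int), some k2)) := by
      rw [top2_fold (fun kv : Int × List String => (kv.2.length : Int)) Prod.fst _
        (fun a _ => by positivity)]
      rw [hBsort]
      simp only [List.map_cons]
    have e1 : ∀ {β : Type} (p q : Int × β) (t : List (Int × β)),
        ((PySem.List.pyGet? (p :: q :: t) 0).map Prod.fst).getD 0 = p.1 := by
      intro β p q t
      simp [PySem.List.pyGet?, PySem.List.pyIdx?, show ((0:Int) ≤ (t.length:Int) + 1) from by positivity]
    have e2 : ∀ {β : Type} (p q : Int × β) (t : List (Int × β)),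
        ((PySem.List.pyGet? (p :: q :: t) 1).map Prod.fst).getD 0 = q.1 := by
      intro β p q t
      simp [PySem.List.pyGet?, PySem.List.pyIdx?]
    have hl1A : ((PySem.List.pyGet? (PySem.List.sorted
        (PySem.Dict.counter (symbols.map (fun i => PySem.Str.len i))).items
        (fun p => p.2) true) 0).map Prod.fst).getD 0 = k1 := by
      rw [hAsort]; simp only [List.map_cons]; exact e1 _ _ _
    have hl2A : ((PySem.List.pyGet? (PySem.List.sorted
        (PySem.Dict.counter (symbols.map (fun i => PySem.Str.len i))).items
        (fun p => p.2) true) 1).map Prod.fst).getD 0 = k2 := by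
      rw [hAsort]; simp only [List.map_cons]; exact e2 _ _ _
    rw [hl1A, hl2A, hst]
    simp only [Option.getD_some]
    rw [triple_fold (fun s => PySem.Str.len s) k1 k2 symbols [] [] []]
    simp only [List.nil_append, Prod.mk.injEq]
    have hbe : ∀ a b : Int, (decide (a = b)) = (a == b) := fun a b => by
      by_cases h : a = b <;> simp [h]
    have h2e : ∀ a : Int, (decide (¬ a = k1 ∧ a = k2)) = (a == k2) := fun a => by
      by_cases h : a = k2 <;> simp [h, Ne.symm hk12]
    refine ⟨?_, ?_, ?_⟩
    · rw [hG_getD k1]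
      exact List.filter_congr (fun s _ => hbe _ _)
    · rw [hG_getD k2]
      exact List.filter_congr (fun s _ => h2e _)
    · trivial
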